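-- pv_equiv track=rewrite | github.com/MillerNerd/Google-Challenges | lovely-lucky-lambs/LAMBs.py | stingy
-- ===== SOURCE A (Python) =====
-- def stingy(total_lambs):
--     if total_lambs < 2:
--         return 1
--     # failed attempt at removing iteration
--     # the sum of fib(0:N) happens to be fib(n+2)-1
--     # https://www.geeksforgeeks.org/find-index-given-fibonacci-number-constant-time/
--     # return math.floor(2.078087 * math.log(total_lambs + 1) + 1.672276) - 2
--
--     # instead, iterate through fib until fib(n) > total_lambs+1
--
--     # fib - 2
--     a = 0
--     # fib - 1
--     b = 1
--     # fib
--     c = 1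
--     # N/iterator
--     n = 1
--     while c <= (total_lambs + 1):
--         # fib(n)
--         c = a + b
--         # iterate
--         n = n + 1
--         a = b
--         b = c
--     return n - 3
-- ===== SOURCE B (Python) =====
-- def stingy(total_lambs):
--     if total_lambs < 2:
--         return 1
--     # Recursively pay the next henchman his Fibonacci amount x out of the
--     # remaining lambs; each successful payment contributes 1 to the count.
--     def pay(rem, x, y):
--         if x > rem:
--             return 0
--         return 1 + pay(rem - x, y, x + y)
--     return pay(total_lambs, 1, 1)
-- ===== Notes on version B (the rewrite author's own statement) =====
-- stated objective: alternative
-- what changed: B replaces A's four-variable Fibonacci iteration with index offsets by a three-argument subtractive recursion on the remaining lambs: each call pays the next Fibonacci amount out of the remainder and returns 1 + the recursive count, with no counter variable and no index offsets.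
import Mathlib
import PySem

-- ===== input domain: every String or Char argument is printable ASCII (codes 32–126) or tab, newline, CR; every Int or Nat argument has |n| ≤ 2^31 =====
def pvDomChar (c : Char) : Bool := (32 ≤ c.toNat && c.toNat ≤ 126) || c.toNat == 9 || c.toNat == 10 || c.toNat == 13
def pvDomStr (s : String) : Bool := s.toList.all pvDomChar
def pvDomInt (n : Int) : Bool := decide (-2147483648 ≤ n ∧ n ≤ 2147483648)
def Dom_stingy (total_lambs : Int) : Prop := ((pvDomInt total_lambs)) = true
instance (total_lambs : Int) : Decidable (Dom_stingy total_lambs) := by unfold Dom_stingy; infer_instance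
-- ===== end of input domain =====

-- B replaces A's four-variable Fibonacci loop (with index offsets on guard and result) by a subtractive
-- recursion on the remaining lambs, paying each Fibonacci amount and counting 1 + … (objective: alternative).

-- ===== PORT A =====
-- A's while loop, step for step: state (a, b, c, n), body c←a+b; n←n+1; a←b; b←c.
-- The Nat argument is fuel, a totality guard only: within |total_lambs| ≤ 2^31 the
-- loop exits after well under 102 iterations (Fibonacci growth), so it never bites.
def stingyLoopA (T : Int) : Nat → Int → Int → Int → Int → Int
  | 0, _, _, _, n => n
  | fuel + 1, a, b, c, n => if c ≤ T + 1 then stingyLoopA T fuel b (a + b) (a + b) (n + 1) else n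

def stingy (total_lambs : Int) : Int :=
  if total_lambs < 2 then 1
  else stingyLoopA total_lambs 102 0 1 1 1 - 3

-- ===== PORT B =====
-- B's helper `pay`, step for step: pay the amount x out of rem, 1 + recurse with
-- (rem - x, y, x + y); stop at 0 when x exceeds rem. Fuel is the same totality guard.
def payB (T : Int) : Nat → Int → Int → Int → Int
  | 0, _, _, _ => 0
  | fuel + 1, rem, x, y => if x > rem then 0 else 1 + payB T fuel (rem - x) y (x + y)

def stingy_alt (total_lambs : Int) : Int :=
  if total_lambs < 2 then 1
  else payB total_lambs 100 total_lambs 1 1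

-- ===== PRECONDITION & SPEC =====
def Spec_stingy (total_lambs : Int) (out : Int) : Prop := out = stingy_alt total_lambs
instance (total_lambs : Int) (out : Int) : Decidable (Spec_stingy total_lambs out) := by unfold Spec_stingy; infer_instance

-- ===== CLAIM (what is proved, stated in full; the proofs are below) =====
def Claim_equal_stingy : Prop := ∀ (total_lambs : Int), Dom_stingy total_lambs → Spec_stingy total_lambs (stingy total_lambs)

-- ===== LEMMAS AND PROOFS =====

-- Bisimulation: A's loop state (y, x+y, x+y, m) corresponds to B's call (T-(y-1), x, y),
-- with A's downstream counter increments matching the 1 + … of each successful payment;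
-- the guards coincide (x+y ≤ T+1 ↔ x ≤ T-(y-1)). Holds for every fuel.
theorem stingy_bisim (T : Int) :
    ∀ (fuel : Nat) (m x y : Int),
      stingyLoopA T fuel y (x + y) (x + y) m = m + payB T fuel (T - (y - 1)) x y := by
  intro fuel
  induction fuel with
  | zero => intro m x y; simp [stingyLoopA, payB]
  | succ f ih =>
      intro m x y
      simp only [stingyLoopA, payB]
      by_cases h : x + y ≤ T + 1
      · rw [if_pos h, if_neg (by omega : ¬ x > T - (y - 1))]
        rw [show T - (y - 1) - x = T - (x + y - 1) by ring, ih (m + 1) y (x + y)]; ring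
      · rw [if_neg h, if_pos (by omega : x > T - (y - 1))]; ring

-- one unfolding step of B's recursion at a successor fuel literal
theorem payB_succ (T : Int) (f : Nat) (rem x y : Int) :
    payB T (f + 1) rem x y = if x > rem then 0 else 1 + payB T f (rem - x) y (x + y) := rfl

-- ===== VERDICT (by name: the statement is the Claim_ definition above) =====
theorem stingy_spec : Claim_equal_stingy := by
  intro T _
  unfold Spec_stingy stingy stingy_alt
  by_cases hT : T < 2
  · rw [if_pos hT, if_pos hT]
  · rw [if_neg hT, if_neg hT]
    -- A's start state (0, 1, 1, 1) has shape (y, x+y, x+y, m) with x = 1, y = 0, m = 1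
    have e := stingy_bisim T 102 1 1 0
    norm_num at e
    rw [e]
    -- peel B's first two payments (amounts 1 and 0 out of T + 1), both allowed since T ≥ 2
    have s1 : payB T 102 (T + 1) 1 0 = 1 + payB T 101 T 0 1 := by
      rw [show (102 : Nat) = 101 + 1 from rfl, payB_succ,
          if_neg (show ¬ (1 : Int) > T + 1 by omega)]
      norm_num
    have s2 : payB T 101 T 0 1 = 1 + payB T 100 T 1 1 := by
      rw [show (101 : Nat) = 100 + 1 from rfl, payB_succ,
          if_neg (show ¬ (0 : Int) > T by omega)]
      norm_num
    rw [s1, s2]; ring
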